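-- pv_equiv track=rewrite | github.com/disputestrike/RELEASE-CRUCIB-2026 | backend/services/simulation/authority.py | authority_tier
-- ===== SOURCE A (Python) =====
-- def authority_tier(url: str, title: str = "") -> int:
--     """
--     Lower tier = higher institutional trust for synthesis.
--     1 = official / registry / primary scientific index
--     2 = major wire / reputable trade
--     3 = general web / encyclopedia
--     4 = social / forum / self-publishing
--     """
--     u = f"{url} {title}".lower()
--     if any(
--         x in u
--         for x in (
--             ".gov/",
--             "clinicaltrials.gov",
--             "pubmed",
--             "ncbi.nlm.nih.gov",
--             "fda.gov",
--             "sec.gov",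
--             "federalregister.gov",
--             "regulations.gov",
--             "europa.eu",
--             "un.org",
--             "imf.org",
--             "worldbank.org",
--         )
--     ):
--         return 1
--     if any(x in u for x in ("nba.com", "nfl.com", "mlb.com", "nhl.com", "fifa.com", "who.int")):
--         return 1
--     if any(x in u for x in ("reuters.com", "apnews.com", "ap.org", "bloomberg.com", "ft.com")):
--         return 2
--     if any(x in u for x in ("espn.com", "sports.yahoo.com", "theathletic.com")):
--         return 2
--     if any(x in u for x in ("wikipedia.org", "britannica.com")):
--         return 3
--     if any(
--         x in u
--         for x in (
--             "reddit.com",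
--             "twitter.",
--             "x.com",
--             "facebook.",
--             "blogspot",
--             "medium.com",
--             "substack.",
--             "tumblr.",
--         )
--     ):
--         return 4
--     return 3
-- ===== SOURCE B (Python) =====
-- _TIER_TABLE = [
--     (1, (".gov/", "clinicaltrials.gov", "pubmed", "ncbi.nlm.nih.gov", "fda.gov",
--          "sec.gov", "federalregister.gov", "regulations.gov", "europa.eu",
--          "un.org", "imf.org", "worldbank.org")),
--     (1, ("nba.com", "nfl.com", "mlb.com", "nhl.com", "fifa.com", "who.int")),
--     (2, ("reuters.com", "apnews.com", "ap.org", "bloomberg.com", "ft.com")),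
--     (2, ("espn.com", "sports.yahoo.com", "theathletic.com")),
--     (3, ("wikipedia.org", "britannica.com")),
--     (4, ("reddit.com", "twitter.", "x.com", "facebook.", "blogspot",
--          "medium.com", "substack.", "tumblr.")),
-- ]
--
--
-- def authority_tier(url: str, title: str = "") -> int:
--     u = f"{url} {title}".lower()
--     matched = [tier for tier, pats in _TIER_TABLE if any(p in u for p in pats)]
--     return min(matched) if matched else 3
-- ===== Notes on version B (the rewrite author's own statement) =====
-- stated objective: simpler
-- what changed: Replaces the six-branch early-return if-ladder with a declarative (tier, patterns) table: collect every tier whose pattern group matches and return the minimum matched tier, defaulting to 3.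
import Mathlib
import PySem

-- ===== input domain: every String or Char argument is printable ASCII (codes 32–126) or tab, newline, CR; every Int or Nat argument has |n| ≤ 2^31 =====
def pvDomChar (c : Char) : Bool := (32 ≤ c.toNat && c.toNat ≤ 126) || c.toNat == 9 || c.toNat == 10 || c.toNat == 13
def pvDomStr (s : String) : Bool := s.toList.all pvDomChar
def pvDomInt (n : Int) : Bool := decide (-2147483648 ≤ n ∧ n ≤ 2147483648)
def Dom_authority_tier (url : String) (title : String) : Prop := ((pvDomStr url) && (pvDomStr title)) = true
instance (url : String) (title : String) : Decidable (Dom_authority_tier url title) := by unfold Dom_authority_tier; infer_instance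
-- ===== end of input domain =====

-- B replaces A's six-branch early-return if-ladder with a (tier, patterns) table:
-- collect all matching tiers and return the minimum (default 3). Objective: simpler.

-- shared pattern-group data (the literal tuples of A / rows of B's table)
def pats1a : List String := [".gov/", "clinicaltrials.gov", "pubmed", "ncbi.nlm.nih.gov", "fda.gov",
  "sec.gov", "federalregister.gov", "regulations.gov", "europa.eu", "un.org", "imf.org", "worldbank.org"]
def pats1b : List String := ["nba.com", "nfl.com", "mlb.com", "nhl.com", "fifa.com", "who.int"]
def pats2a : List String := ["reuters.com", "apnews.com", "ap.org", "bloomberg.com", "ft.com"]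
def pats2b : List String := ["espn.com", "sports.yahoo.com", "theathletic.com"]
def pats3 : List String := ["wikipedia.org", "britannica.com"]
def pats4 : List String := ["reddit.com", "twitter.", "x.com", "facebook.", "blogspot",
  "medium.com", "substack.", "tumblr."]

-- f"{url} {title}".lower() ; concatenation done on code points (exact for Python str concat)
def mkU (url : String) (title : String) : String :=
  PySem.Str.lower (String.ofList (url.toList ++ ' ' :: title.toList))

-- ===== PORT A =====
def authority_tier (url : String) (title : String) : Int :=
  let u := mkU url title
  if pats1a.any (fun x => PySem.Str.isIn x u) then 1
  else if pats1b.any (fun x => PySem.Str.isIn x u) then 1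
  else if pats2a.any (fun x => PySem.Str.isIn x u) then 2
  else if pats2b.any (fun x => PySem.Str.isIn x u) then 2
  else if pats3.any (fun x => PySem.Str.isIn x u) then 3
  else if pats4.any (fun x => PySem.Str.isIn x u) then 4
  else 3

-- ===== PORT B =====
def tierTable : List (Int × List String) :=
  [(1, pats1a), (1, pats1b), (2, pats2a), (2, pats2b), (3, pats3), (4, pats4)]

def authority_tier_alt (url : String) (title : String) : Int :=
  let u := mkU url title
  let matched := (tierTable.filter (fun tp => tp.2.any (fun p => PySem.Str.isIn p u))).map Prod.fst
  match PySem.List.min? matched (fun x => x) with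
  | some m => m
  | none => 3

-- ===== PRECONDITION & SPEC =====
def Spec_authority_tier (url : String) (title : String) (out : Int) : Prop := out = authority_tier_alt url title
instance (url : String) (title : String) (out : Int) : Decidable (Spec_authority_tier url title out) := by unfold Spec_authority_tier; infer_instance

-- ===== CLAIM (what is proved, stated in full; the proofs are below) =====
def Claim_equal_authority_tier : Prop := ∀ (url : String) (title : String), Dom_authority_tier url title → Spec_authority_tier url title (authority_tier url title)

-- ===== LEMMAS AND PROOFS =====

-- ===== VERDICT (by name: the statement is the Claim_ definition above) =====
theorem authority_tier_spec : Claim_equal_authority_tier := by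
  intro url title _
  unfold Spec_authority_tier authority_tier authority_tier_alt tierTable
  set u := mkU url title with hu
  by_cases h1 : pats1a.any (fun x => PySem.Chars.isIn x.toList u.toList) = true <;>
  by_cases h2 : pats1b.any (fun x => PySem.Chars.isIn x.toList u.toList) = true <;>
  by_cases h3 : pats2a.any (fun x => PySem.Chars.isIn x.toList u.toList) = true <;>
  by_cases h4 : pats2b.any (fun x => PySem.Chars.isIn x.toList u.toList) = true <;>
  by_cases h5 : pats3.any (fun x => PySem.Chars.isIn x.toList u.toList) = true <;>
  by_cases h6 : pats4.any (fun x => PySem.Chars.isIn x.toList u.toList) = true <;>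
  simp [List.filter, h1, h2, h3, h4, h5, h6, PySem.List.min?]
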